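-- pv_equiv track=rewrite | github.com/MR-Unknown-Cm/addons | plugin.video.bcreborn/resources/lib/modules/source_utils.py | check_direct_url
-- ===== SOURCE A (Python) =====
-- def check_direct_url(url):
--     try:
--         if '2160' in url:
--             quality = '4K'
--         elif '4k' in url:
--             quality = '4K'
--         elif '1080p' in url:
--             quality = '1080p'
--         elif '1080' in url:
--             quality = '1080p'
--         elif '720p' in url:
--             quality = '720p'
--         elif '720' in url:
--             quality = '720p'
--         elif 'hd' in url:
--             quality = '720p'
--         elif '.hd' in url:
--             quality = '720p'
--         elif 'HD' in url:
--             quality = '720p'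
--         elif 'hdtv' in url:
--             quality = '720p'
--         elif 'bluray' in url:
--             quality = '720p'
--         elif 'BluRay' in url:
--             quality = '720p'
--         elif '480p' in url:
--             quality = '480p'
--         elif '480' in url:
--             quality = '480p'
--         elif any(i in ['dvdscr', 'r5', 'r6'] for i in url):
--             quality = 'SCR'
--         elif any(i in ['camrip', 'tsrip', 'hdcam', 'hdts', 'dvdcam', 'dvdts', 'cam', 'telesync', 'ts'] for i in url):
--             quality = 'CAM'
--         else:
--             quality = 'SD'
--         return quality
--     except:
--         return 'SD'
-- ===== SOURCE B (Python) =====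
-- # Ordered dispatch table instead of the elif cascade; the two any(i in [...]) branches
-- # of A iterate characters of the string against multi-character words, so for string
-- # input they can never match and the loop falls through to 'SD'.
-- _TABLE = [
--     ('2160', '4K'), ('4k', '4K'),
--     ('1080p', '1080p'), ('1080', '1080p'),
--     ('720p', '720p'), ('720', '720p'),
--     ('hd', '720p'), ('.hd', '720p'), ('HD', '720p'),
--     ('hdtv', '720p'), ('bluray', '720p'), ('BluRay', '720p'),
--     ('480p', '480p'), ('480', '480p'),
-- ]
--
-- def check_direct_url(url):
--     for pat, lab in _TABLE:
--         if pat in url: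
--             return lab
--     return 'SD'
-- ===== Notes on version B (the rewrite author's own statement) =====
-- stated objective: simpler
-- what changed: The elif cascade is replaced by a traversed ordered (pattern, label) dispatch table returning the first matching label; the two any(i in [...]) character-membership branches, which can never match a string's 1-character elements, and the try/except are dropped as dead code for string input.
import Mathlib
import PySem

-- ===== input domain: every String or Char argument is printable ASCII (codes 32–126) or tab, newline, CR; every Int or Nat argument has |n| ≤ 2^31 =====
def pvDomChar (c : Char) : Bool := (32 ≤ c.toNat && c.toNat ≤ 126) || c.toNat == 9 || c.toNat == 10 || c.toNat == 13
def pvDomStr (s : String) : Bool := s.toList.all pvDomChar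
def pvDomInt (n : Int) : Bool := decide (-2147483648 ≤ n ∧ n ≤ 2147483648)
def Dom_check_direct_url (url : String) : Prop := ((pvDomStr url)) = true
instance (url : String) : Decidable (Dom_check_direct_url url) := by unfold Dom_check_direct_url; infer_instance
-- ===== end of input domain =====

-- B replaces A's elif cascade by a traversed ordered (pattern, label) dispatch table and
-- drops A's two character-membership branches and try/except, which are dead for string input (simpler).

-- ===== PORT A =====
def check_direct_url (url : String) : String :=
  if PySem.Str.isIn "2160" url then "4K"
  else if PySem.Str.isIn "4k" url then "4K"
  else if PySem.Str.isIn "1080p" url then "1080p"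
  else if PySem.Str.isIn "1080" url then "1080p"
  else if PySem.Str.isIn "720p" url then "720p"
  else if PySem.Str.isIn "720" url then "720p"
  else if PySem.Str.isIn "hd" url then "720p"
  else if PySem.Str.isIn ".hd" url then "720p"
  else if PySem.Str.isIn "HD" url then "720p"
  else if PySem.Str.isIn "hdtv" url then "720p"
  else if PySem.Str.isIn "bluray" url then "720p"
  else if PySem.Str.isIn "BluRay" url then "720p"
  else if PySem.Str.isIn "480p" url then "480p"
  else if PySem.Str.isIn "480" url then "480p"
  -- any(i in [...] for i in url): each i is a 1-character string
  else if url.toList.any (fun i => (["dvdscr", "r5", "r6"] : List String).contains (String.ofList [i])) then "SCR"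
  else if url.toList.any (fun i => (["camrip", "tsrip", "hdcam", "hdts", "dvdcam", "dvdts", "cam", "telesync", "ts"] : List String).contains (String.ofList [i])) then "CAM"
  else "SD"

-- ===== PORT B =====
def pvTable : List (String × String) :=
  [("2160", "4K"), ("4k", "4K"),
   ("1080p", "1080p"), ("1080", "1080p"),
   ("720p", "720p"), ("720", "720p"),
   ("hd", "720p"), (".hd", "720p"), ("HD", "720p"),
   ("hdtv", "720p"), ("bluray", "720p"), ("BluRay", "720p"),
   ("480p", "480p"), ("480", "480p")]

def pvFirstMatch (url : String) : List (String × String) → String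
  | [] => "SD"
  | (pat, lab) :: rest => if PySem.Str.isIn pat url then lab else pvFirstMatch url rest

def check_direct_url_alt (url : String) : String := pvFirstMatch url pvTable

-- ===== PRECONDITION & SPEC =====
def Spec_check_direct_url (url : String) (out : String) : Prop := out = check_direct_url_alt url
instance (url : String) (out : String) : Decidable (Spec_check_direct_url url out) := by unfold Spec_check_direct_url; infer_instance

-- ===== CLAIM (what is proved, stated in full; the proofs are below) =====
def Claim_equal_check_direct_url : Prop := ∀ (url : String), Dom_check_direct_url url → Spec_check_direct_url url (check_direct_url url)

-- ===== LEMMAS AND PROOFS =====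

-- A one-character string is never one of the multi-character words in A's two `any` branches.
theorem pvAnyScr_false (url : String) :
    url.toList.any (fun i => (["dvdscr", "r5", "r6"] : List String).contains (String.ofList [i])) = false := by
  simp only [List.any_eq_false]
  intro c _
  simp only [List.contains_eq_mem, List.mem_cons, List.not_mem_nil, or_false, decide_eq_true_eq, not_or]
  refine ⟨?_, ?_, ?_⟩ <;>
    · intro h; have := congrArg String.toList h; simp [String.toList_ofList] at this

theorem pvAnyCam_false (url : String) :
    url.toList.any (fun i => (["camrip", "tsrip", "hdcam", "hdts", "dvdcam", "dvdts", "cam", "telesync", "ts"] : List String).contains (String.ofList [i])) = false := by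
  simp only [List.any_eq_false]
  intro c _
  simp only [List.contains_eq_mem, List.mem_cons, List.not_mem_nil, or_false, decide_eq_true_eq, not_or]
  refine ⟨?_, ?_, ?_, ?_, ?_, ?_, ?_, ?_, ?_⟩ <;>
    · intro h; have := congrArg String.toList h; simp [String.toList_ofList] at this

-- ===== VERDICT (by name: the statement is the Claim_ definition above) =====
theorem check_direct_url_spec : Claim_equal_check_direct_url := by
  intro url _
  unfold Spec_check_direct_url check_direct_url check_direct_url_alt pvTable
  rw [pvAnyScr_false, pvAnyCam_false]
  simp only [pvFirstMatch, Bool.false_eq_true, if_false]
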